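-- pv_equiv track=rewrite | github.com/jmin123/coding-problem-repo | puzzle_piece_assembling.py | get_all_rotations
-- ===== SOURCE A (Python) =====
-- from typing import List, Tuple
--
-- def rotate(shape: List[Tuple[int, int]]) -> List[Tuple[int, int]]:
--     """
--     주어진 모양을 90도 시계 방향으로 회전시킵니다.
--
--     Parameters:
--     - shape (List[Tuple[int, int]]): 회전시킬 모양의 좌표 리스트.
--
--     Returns:
--     - List[Tuple[int, int]]: 회전된 모양의 좌표 리스트.
--     """
--     rotated_shape = []  # 회전된 좌표들을 저장할 리스트
--
--     # 각 좌표를 90도 시계 방향으로 회전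
--     for coord in shape:
--         x = coord[0]
--         y = coord[1]
--         rotated_shape.append((y, -x))
--
--     # 회전된 좌표들을 정렬하여 일관된 순서를 유지
--     rotated_shape_sorted = sorted(rotated_shape)
--
--     return rotated_shape_sorted
--
-- def get_all_rotations(shape: List[Tuple[int, int]]) -> List[List[Tuple[int, int]]]:
--     """
--     주어진 모양의 모든 독특한 회전 형태를 생성하여 반환합니다.
--
--     Parameters:
--     - shape (List[Tuple[int, int]]): 원본 모양의 좌표 리스트.
--
--     Returns:
--     - List[List[Tuple[int, int]]]: 모든 독특한 회전된 모양의 리스트.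
--     """
--     rotations = []  # 모든 회전된 모양을 저장할 리스트
--     current_shape = shape  # 현재 회전할 모양을 저장
--
--     for rotation_count in range(4):
--         # 현재 모양을 회전
--         rotated = rotate(current_shape)
--
--         # 회전된 모양을 정규화
--         # 최소 x와 y를 찾아서 모든 좌표를 이동
--         min_x = rotated[0][0]
--         min_y = rotated[0][1]
--         for coord in rotated:
--             if coord[0] < min_x:
--                 min_x = coord[0]
--             if coord[1] < min_y:
--                 min_y = coord[1]
--
--         normalized_rotated_shape = []  # 정규화된 회전된 모양의 좌표를 저장할 리스트
--         for coord in rotated: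
--             normalized_x = coord[0] - min_x
--             normalized_y = coord[1] - min_y
--             normalized_rotated_shape.append((normalized_x, normalized_y))
--
--         # 좌표들을 정렬하여 일관된 순서를 유지
--         normalized_rotated_shape_sorted = sorted(normalized_rotated_shape)
--
--         # 이미 존재하지 않는 형태라면 추가
--         already_exists = False
--         for existing_shape in rotations:
--             if existing_shape == normalized_rotated_shape_sorted:
--                 already_exists = True
--                 break
--
--         if not already_exists:
--             rotations.append(normalized_rotated_shape_sorted)
--
--         # 다음 회전을 위해 현재 모양 업데이트
--         current_shape = normalized_rotated_shape_sorted
--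
--     return rotations
-- ===== SOURCE B (Python) =====
-- from typing import List, Tuple
--
-- # The four 90-degree orientations computed directly from the original shape
-- # (closed forms of rotating k=1..4 times), each normalized and sorted; then
-- # one dedup pass preserving first-occurrence order.
--
-- def get_all_rotations(shape: List[Tuple[int, int]]) -> List[List[Tuple[int, int]]]:
--     orientation_maps = [
--         lambda x, y: (y, -x),
--         lambda x, y: (-x, -y),
--         lambda x, y: (-y, x),
--         lambda x, y: (x, y),
--     ]
--
--     shapes = []
--     for f in orientation_maps:
--         pts = [f(x, y) for (x, y) in shape]
--         min_x = min(p[0] for p in pts)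
--         min_y = min(p[1] for p in pts)
--         shapes.append(sorted((x - min_x, y - min_y) for (x, y) in pts))
--
--     unique = []
--     for s in shapes:
--         if s not in unique:
--             unique.append(s)
--     return unique
-- ===== Notes on version B (the rewrite author's own statement) =====
-- stated objective: alternative
-- what changed: B computes the four orientations independently from the original shape via closed-form rotation maps (y,-x),(-x,-y),(-y,x),(x,y), normalizes each with min() and sorts, then deduplicates in a separate order-preserving pass, instead of A's stateful chain that re-rotates the previously normalized/sorted shape and deduplicates inline with a scan-and-break loop.
import Mathlib
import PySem

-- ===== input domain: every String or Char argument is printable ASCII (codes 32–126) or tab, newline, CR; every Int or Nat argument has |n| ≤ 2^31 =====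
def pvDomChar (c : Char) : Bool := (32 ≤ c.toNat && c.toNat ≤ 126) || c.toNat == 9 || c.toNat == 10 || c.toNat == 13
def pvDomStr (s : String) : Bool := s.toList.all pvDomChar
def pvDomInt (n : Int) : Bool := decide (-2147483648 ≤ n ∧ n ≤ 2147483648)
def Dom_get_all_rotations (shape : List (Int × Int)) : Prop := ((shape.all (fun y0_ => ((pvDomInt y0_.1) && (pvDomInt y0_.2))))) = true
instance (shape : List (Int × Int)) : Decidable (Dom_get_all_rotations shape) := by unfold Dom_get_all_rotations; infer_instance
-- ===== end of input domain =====

-- B computes the four orientations independently from the original shape via closed-form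
-- rotation maps and deduplicates in a separate pass (objective: alternative decomposition).

-- ===== PORT A =====
-- rotate: append (y,-x) for each coord, then sorted(...)
def rotateA (shape : List (Int × Int)) : List (Int × Int) :=
  let rotated := shape.foldl (fun acc c => acc ++ [(c.2, -c.1)]) []
  PySem.List.sorted2 rotated Prod.fst Prod.snd

-- one iteration of A's `for rotation_count in range(4)` loop, state = (rotations, current_shape)
def stepA (st : List (List (Int × Int)) × List (Int × Int)) (_ : Int) :
    List (List (Int × Int)) × List (Int × Int) :=
  let rotated := rotateA st.2
  match PySem.List.pyGet? rotated 0 with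
  | none => st  -- Python raises IndexError here (only reachable for empty shape; excluded by Pre_)
  | some h =>
    let mins := rotated.foldl (fun (m : Int × Int) c =>
        (if c.1 < m.1 then c.1 else m.1, if c.2 < m.2 then c.2 else m.2)) (h.1, h.2)
    let normalized := rotated.foldl (fun acc c => acc ++ [(c.1 - mins.1, c.2 - mins.2)]) []
    let ns := PySem.List.sorted2 normalized Prod.fst Prod.snd
    let already := st.1.foldl (fun b e => if e = ns then true else b) false
    ((if already then st.1 else st.1 ++ [ns]), ns)

def get_all_rotations (shape : List (Int × Int)) : List (List (Int × Int)) :=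
  ((PySem.List.pyRange 0 4 1).foldl stepA ([], shape)).1

-- ===== PORT B =====
def rotMapsB : List ((Int × Int) → (Int × Int)) :=
  [fun p => (p.2, -p.1), fun p => (-p.1, -p.2), fun p => (-p.2, p.1), fun p => (p.1, p.2)]

-- normalize (subtract per-axis min()) and sort; min() raises ValueError on [] (excluded by Pre_)
def normSortB (pts : List (Int × Int)) : List (Int × Int) :=
  match PySem.List.min? (pts.map Prod.fst) (fun x => x), PySem.List.min? (pts.map Prod.snd) (fun x => x) with
  | some mx, some my =>
      PySem.List.sorted2 (pts.map (fun p => (p.1 - mx, p.2 - my))) Prod.fst Prod.snd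
  | _, _ => []

def get_all_rotations_alt (shape : List (Int × Int)) : List (List (Int × Int)) :=
  let shapes := rotMapsB.map (fun f => normSortB (shape.map f))
  shapes.foldl (fun unique s => if s ∈ unique then unique else unique ++ [s]) []

-- ===== PRECONDITION & SPEC =====
-- Pre_ excludes only the empty list, on which A raises IndexError (rotated[0]) and B raises ValueError (min()).
def Pre_get_all_rotations (shape : List (Int × Int)) : Prop := shape ≠ []
instance (shape : List (Int × Int)) : Decidable (Pre_get_all_rotations shape) := by unfold Pre_get_all_rotations; infer_instance
def pvWitness_get_all_rotations : (List (Int × Int)) := [(0, 0), (1, 0), (1, 1)]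

def Spec_get_all_rotations (shape : List (Int × Int)) (out : List (List (Int × Int))) : Prop := out = get_all_rotations_alt shape
instance (shape : List (Int × Int)) (out : List (List (Int × Int))) : Decidable (Spec_get_all_rotations shape out) := by unfold Spec_get_all_rotations; infer_instance

-- ===== CLAIM (what is proved, stated in full; the proofs are below) =====
def Claim_equal_get_all_rotations : Prop := ∀ (shape : List (Int × Int)), Dom_get_all_rotations shape → Pre_get_all_rotations shape → Spec_get_all_rotations shape (get_all_rotations shape)

-- ===== LEMMAS AND PROOFS =====

-- Python's tuple sort (sorted2 with fst/snd keys) is PySem's sorted with the lexicographic key.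
theorem sorted2_eq_sorted_toLex (xs : List (Int × Int)) :
    PySem.List.sorted2 xs Prod.fst Prod.snd false
      = PySem.List.sorted xs (fun p => toLex p) false := by
  rw [PySem.List.sorted_eq_foldl_insertBy]
  show xs.foldl (fun acc x => PySem.List.insertBy
      (fun a b => decide (a.1 < b.1) || (!decide (b.1 < a.1) && decide (a.2 < b.2))) x acc) []
    = _
  have : (fun (a b : Int × Int) => decide (a.1 < b.1) || (!decide (b.1 < a.1) && decide (a.2 < b.2)))
       = (fun (a b : Int × Int) => decide (toLex a < toLex b)) := by
    funext a b
    by_cases h1 : a.1 < b.1 <;> by_cases h2 : b.1 < a.1 <;> by_cases h3 : a.2 < b.2 <;>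
      simp [h1, h2, h3, Prod.Lex.lt_iff] <;> omega
  rw [this]

theorem sorted2_perm_eq {xs ys : List (Int × Int)} (h : xs.Perm ys) :
    PySem.List.sorted2 xs Prod.fst Prod.snd false
      = PySem.List.sorted2 ys Prod.fst Prod.snd false := by
  rw [sorted2_eq_sorted_toLex, sorted2_eq_sorted_toLex]
  exact PySem.List.sorted_eq_sorted_of_perm xs ys (fun p => toLex p) toLex.injective h

theorem min?_id_eq_some_iff (xs : List Int) (m : Int) :
    PySem.List.min? xs (fun x => x) = some m ↔ (m ∈ xs ∧ ∀ y ∈ xs, m ≤ y) := by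
  constructor
  · intro h
    exact ⟨PySem.List.min?_mem h, PySem.List.min?_isMin h⟩
  · rintro ⟨hm, hmin⟩
    have hne : xs ≠ [] := by rintro rfl; simp at hm
    cases hx : PySem.List.min? xs (fun x => x) with
    | none => exact absurd ((PySem.List.min?_eq_none_iff _ _).mp hx) hne
    | some m' =>
      have h1 : m' ∈ xs := PySem.List.min?_mem hx
      have h2 : ∀ y ∈ xs, m' ≤ y := PySem.List.min?_isMin hx
      have : m' = m := le_antisymm (h2 m hm) (hmin m' h1)
      rw [this]

theorem min?_id_perm {xs ys : List Int} (h : xs.Perm ys) :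
    PySem.List.min? xs (fun x => x) = PySem.List.min? ys (fun x => x) := by
  cases hx : PySem.List.min? ys (fun x => x) with
  | none =>
    rw [PySem.List.min?_eq_none_iff _ _] at hx
    subst hx
    rw [PySem.List.min?_eq_none_iff _ _]
    exact h.eq_nil
  | some m =>
    rw [min?_id_eq_some_iff] at hx ⊢
    exact ⟨h.mem_iff.mpr hx.1, fun y hy => hx.2 y (h.mem_iff.mp hy)⟩

theorem normSortB_perm {xs ys : List (Int × Int)} (h : xs.Perm ys) :
    normSortB xs = normSortB ys := by
  unfold normSortB
  rw [min?_id_perm (h.map Prod.fst), min?_id_perm (h.map Prod.snd)]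
  cases PySem.List.min? (ys.map Prod.fst) (fun x => x) with
  | none => rfl
  | some mx =>
    cases PySem.List.min? (ys.map Prod.snd) (fun x => x) with
    | none => rfl
    | some my => exact sorted2_perm_eq (h.map _)

theorem min?_id_shift {ys : List Int} {m : Int} (d : Int)
    (h : PySem.List.min? ys (fun x => x) = some m) :
    PySem.List.min? (ys.map (fun v => v + d)) (fun x => x) = some (m + d) := by
  rw [min?_id_eq_some_iff] at h ⊢
  constructor
  · exact List.mem_map.mpr ⟨m, h.1, rfl⟩
  · intro y hy
    obtain ⟨v, hv, rfl⟩ := List.mem_map.mp hy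
    have := h.2 v hv
    omega

theorem normSortB_translate (xs : List (Int × Int)) (d e : Int) :
    normSortB (xs.map (fun p => (p.1 + d, p.2 + e))) = normSortB xs := by
  have hf : (xs.map (fun p => (p.1 + d, p.2 + e))).map Prod.fst = (xs.map Prod.fst).map (fun v => v + d) := by
    simp [List.map_map, Function.comp_def]
  have hs : (xs.map (fun p => (p.1 + d, p.2 + e))).map Prod.snd = (xs.map Prod.snd).map (fun v => v + e) := by
    simp [List.map_map, Function.comp_def]
  unfold normSortB
  rw [hf, hs]
  cases hx : PySem.List.min? (xs.map Prod.fst) (fun x => x) with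
  | none =>
    rw [PySem.List.min?_eq_none_iff _ _] at hx
    have : xs = [] := by simpa using hx
    subst this; rfl
  | some mx =>
    cases hy : PySem.List.min? (xs.map Prod.snd) (fun x => x) with
    | none =>
      rw [PySem.List.min?_eq_none_iff _ _] at hy
      have : xs = [] := by simpa using hy
      subst this
      simp [PySem.List.min?] at hx
    | some my =>
      rw [min?_id_shift d hx, min?_id_shift e hy]
      dsimp only
      congr 1
      rw [List.map_map]
      apply List.map_congr_left
      intro p _
      refine Prod.ext ?_ ?_ <;> simp only [Function.comp_def] <;> ring

theorem normSortB_ne_nil (l : List (Int × Int)) (hl : l ≠ []) : normSortB l ≠ [] := by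
  unfold normSortB
  cases hx : PySem.List.min? (l.map Prod.fst) (fun x => x) with
  | none =>
    rw [PySem.List.min?_eq_none_iff _ _] at hx
    exact absurd (by simpa using hx) hl
  | some mx =>
    cases hy : PySem.List.min? (l.map Prod.snd) (fun x => x) with
    | none =>
      rw [PySem.List.min?_eq_none_iff _ _] at hy
      exact absurd (by simpa using hy) hl
    | some my =>
      dsimp only
      intro hcon
      have := (PySem.List.sorted2_perm (l.map (fun p => (p.1 - mx, p.2 - my))) Prod.fst Prod.snd false).length_eq
      rw [hcon] at this
      simp at this
      exact hl (List.eq_nil_of_length_eq_zero this.symm)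

def rotP (p : Int × Int) : Int × Int := (p.2, -p.1)

theorem normSortB_chain (l : List (Int × Int)) (hl : l ≠ []) :
    normSortB ((normSortB l).map rotP) = normSortB (l.map rotP) := by
  obtain ⟨mx, hx⟩ : ∃ mx, PySem.List.min? (l.map Prod.fst) (fun x => x) = some mx := by
    cases h : PySem.List.min? (l.map Prod.fst) (fun x => x) with
    | none => rw [PySem.List.min?_eq_none_iff _ _] at h; exact absurd (by simpa using h) hl
    | some mx => exact ⟨mx, rfl⟩
  obtain ⟨my, hy⟩ : ∃ my, PySem.List.min? (l.map Prod.snd) (fun x => x) = some my := by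
    cases h : PySem.List.min? (l.map Prod.snd) (fun x => x) with
    | none => rw [PySem.List.min?_eq_none_iff _ _] at h; exact absurd (by simpa using h) hl
    | some my => exact ⟨my, rfl⟩
  have hdef : normSortB l = PySem.List.sorted2 (l.map (fun p => (p.1 - mx, p.2 - my))) Prod.fst Prod.snd := by
    unfold normSortB; rw [hx, hy]
  have hperm : (normSortB l).Perm (l.map (fun p => (p.1 - mx, p.2 - my))) := by
    rw [hdef]; exact PySem.List.sorted2_perm _ _ _ _
  rw [normSortB_perm (hperm.map rotP)]
  have : (l.map (fun p => (p.1 - mx, p.2 - my))).map rotP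
       = (l.map rotP).map (fun p => (p.1 + (-my), p.2 + mx)) := by
    rw [List.map_map, List.map_map]
    apply List.map_congr_left
    intro p _
    refine Prod.ext ?_ ?_ <;> simp only [Function.comp_def, rotP] <;> ring
  rw [this, normSortB_translate]

-- A's linear dedup scan (`for existing ...: if == : break`) is a membership test
theorem foldl_eq_check (out : List (List (Int × Int))) (ns : List (Int × Int)) (b : Bool) :
    out.foldl (fun b e => if e = ns then true else b) b = (b || decide (ns ∈ out)) := by
  induction out generalizing b with
  | nil => simp
  | cons x t ih =>
    simp only [List.foldl_cons, ih, List.mem_cons]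
    by_cases hx : x = ns
    · subst hx; simp
    · simp [hx, Ne.symm hx]

-- A's running-min update is the min fold
theorem min_fold_eq (l : List Int) (a : Int) :
    l.foldl (fun a v => if v < a then v else a) a = l.foldl min a := by
  apply PySem.List.foldl_congr_mem
  intro acc x _
  rw [min_def]
  split_ifs <;> omega

theorem stepA_spec (out : List (List (Int × Int))) (cur : List (Int × Int)) (hc : cur ≠ []) (i : Int) :
    stepA (out, cur) i
    = (if normSortB (cur.map rotP) ∈ out then out else out ++ [normSortB (cur.map rotP)],
       normSortB (cur.map rotP)) := by
  have hrot : rotateA cur = PySem.List.sorted2 (cur.map rotP) Prod.fst Prod.snd := by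
    unfold rotateA
    rw [PySem.List.foldl_append_singleton_eq_map]
    rfl
  have hperm : (rotateA cur).Perm (cur.map rotP) := by
    rw [hrot]; exact PySem.List.sorted2_perm _ _ _ _
  have hne : rotateA cur ≠ [] := by
    intro h0
    have := hperm.length_eq
    rw [h0] at this
    simp at this
    exact hc (List.eq_nil_of_length_eq_zero this.symm)
  obtain ⟨h, t, hht⟩ : ∃ h t, rotateA cur = h :: t := by
    cases hr : rotateA cur with
    | nil => exact absurd hr hne
    | cons h t => exact ⟨h, t, rfl⟩
  have hget : PySem.List.pyGet? (h :: t) (0 : Int) = some h := by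
    simp [PySem.List.pyGet?, PySem.List.pyIdx?]
  unfold stepA
  dsimp only
  rw [hht, hget]
  dsimp only
  rw [PySem.List.foldl_prod_mk (f := fun a (c : Int × Int) => if c.1 < a then c.1 else a)
        (g := fun a (c : Int × Int) => if c.2 < a then c.2 else a)]
  have hminf : (h :: t).foldl (fun a (c : Int × Int) => if c.1 < a then c.1 else a) h.1
      = (t.map Prod.fst).foldl min h.1 := by
    rw [show (h :: t).foldl (fun a (c : Int × Int) => if c.1 < a then c.1 else a) h.1
          = ((h :: t).map Prod.fst).foldl (fun a v => if v < a then v else a) h.1 from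
          (List.foldl_map (f := Prod.fst) (g := fun a v => if v < a then v else a)).symm]
    rw [min_fold_eq]
    simp [min_self]
  have hming : (h :: t).foldl (fun a (c : Int × Int) => if c.2 < a then c.2 else a) h.2
      = (t.map Prod.snd).foldl min h.2 := by
    rw [show (h :: t).foldl (fun a (c : Int × Int) => if c.2 < a then c.2 else a) h.2
          = ((h :: t).map Prod.snd).foldl (fun a v => if v < a then v else a) h.2 from
          (List.foldl_map (f := Prod.snd) (g := fun a v => if v < a then v else a)).symm]
    rw [min_fold_eq]
    simp [min_self]
  rw [hminf, hming]
  have hpermht : (h :: t).Perm (cur.map rotP) := hht ▸ hperm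
  have hmx : PySem.List.min? ((cur.map rotP).map Prod.fst) (fun x => x)
      = some ((t.map Prod.fst).foldl min h.1) := by
    rw [← min?_id_perm (hpermht.map Prod.fst)]
    simpa using PySem.List.min?_id_cons h.1 (t.map Prod.fst)
  have hmy : PySem.List.min? ((cur.map rotP).map Prod.snd) (fun x => x)
      = some ((t.map Prod.snd).foldl min h.2) := by
    rw [← min?_id_perm (hpermht.map Prod.snd)]
    simpa using PySem.List.min?_id_cons h.2 (t.map Prod.snd)
  rw [PySem.List.foldl_append_singleton_eq_map]
  have hnorm : normSortB (cur.map rotP)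
      = PySem.List.sorted2 ((cur.map rotP).map
          (fun p => (p.1 - (t.map Prod.fst).foldl min h.1, p.2 - (t.map Prod.snd).foldl min h.2)))
          Prod.fst Prod.snd := by
    unfold normSortB
    rw [hmx, hmy]
  have hns : PySem.List.sorted2 ([] ++ (h :: t).map
        (fun c => (c.1 - (t.map Prod.fst).foldl min h.1, c.2 - (t.map Prod.snd).foldl min h.2)))
        Prod.fst Prod.snd = normSortB (cur.map rotP) := by
    rw [hnorm, List.nil_append]
    exact sorted2_perm_eq (hpermht.map _)
  rw [hns, foldl_eq_check]
  simp only [Bool.false_or, decide_eq_true_eq]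

theorem main_equiv (shape : List (Int × Int)) (hs : shape ≠ []) :
    get_all_rotations shape = get_all_rotations_alt shape := by
  have hm : ∀ (f : (Int × Int) → (Int × Int)), shape.map f ≠ [] := by
    intro f h
    exact hs (List.map_eq_nil_iff.mp h)
  have h1 : normSortB (shape.map rotP) ≠ [] := normSortB_ne_nil _ (hm _)
  have h2 : normSortB (shape.map (fun p => (-p.1, -p.2))) ≠ [] := normSortB_ne_nil _ (hm _)
  have h3 : normSortB (shape.map (fun p => (-p.2, p.1))) ≠ [] := normSortB_ne_nil _ (hm _)
  have hc2 : normSortB ((normSortB (shape.map rotP)).map rotP)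
      = normSortB (shape.map (fun p => (-p.1, -p.2))) := by
    rw [normSortB_chain _ (hm _), List.map_map]
    rfl
  have hc3 : normSortB ((normSortB (shape.map (fun p => (-p.1, -p.2)))).map rotP)
      = normSortB (shape.map (fun p => (-p.2, p.1))) := by
    rw [normSortB_chain _ (hm _), List.map_map]
    congr 1
    apply List.map_congr_left
    intro p _
    refine Prod.ext ?_ ?_ <;> simp [rotP]
  have hc4 : normSortB ((normSortB (shape.map (fun p => (-p.2, p.1)))).map rotP)
      = normSortB (shape.map (fun p => (p.1, p.2))) := by
    rw [normSortB_chain _ (hm _), List.map_map]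
    congr 1
    apply List.map_congr_left
    intro p _
    refine Prod.ext ?_ ?_ <;> simp [rotP]
  have hrange : PySem.List.pyRange 0 4 1 = [0, 1, 2, 3] := by decide
  unfold get_all_rotations
  rw [hrange]
  simp only [List.foldl_cons, List.foldl_nil]
  rw [stepA_spec [] shape hs 0, stepA_spec _ _ h1 1, hc2, stepA_spec _ _ h2 2, hc3,
      stepA_spec _ _ h3 3, hc4]
  unfold get_all_rotations_alt rotMapsB rotP
  simp only [List.map_cons, List.map_nil, List.foldl_cons, List.foldl_nil]

-- ===== VERDICT (by name: the statement is the Claim_ definition above) =====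
theorem get_all_rotations_spec : Claim_equal_get_all_rotations := by
  intro shape _ hpre
  unfold Spec_get_all_rotations
  exact main_equiv shape hpre
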